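-- pv_equiv track=rewrite | github.com/nirhalfon/EntraScout | entrascout/checks/federation.py | classify_relying_parties
-- ===== SOURCE A (Python) =====
-- RP_SENSITIVE_TOKENS = {
--     "admin": "admin portal",
--     "claimsxray": "Microsoft debug Relying Party (should never be in production)",
--     "test": "non-production environment registered alongside prod",
--     "dev": "development environment",
--     "stage": "staging environment",
--     "ops]": "operations admin (e.g. [Ops] prefix)",
--     "knox": "Samsung Knox / privileged management",
--     "sso": "SSO admin",
--     "idp": "IdP admin",
--     "vault": "secrets vault",
--     "sap": "SAP",
--     "workday": "Workday HR",
--     "salesforce": "Salesforce",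
--     "zscaler": "Zscaler admin",
--     "privileg": "privileged access",
--     "secret": "secrets",
--     "sti(": "Threat Intelligence (named explicitly)",
-- }
--
-- def classify_relying_parties(rps: list[str]) -> dict[str, list[tuple[str, str]]]:
--     """Group RPs by sensitivity tokens. Returns {token_label: [(rp, reason), ...]}."""
--     by_token: dict[str, list[tuple[str, str]]] = {}
--     for rp in rps:
--         rp_low = rp.lower()
--         for tok, label in RP_SENSITIVE_TOKENS.items():
--             if tok in rp_low:
--                 by_token.setdefault(label, []).append((rp, label))
--                 break
--     return by_token
-- ===== SOURCE B (Python) =====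
-- RP_SENSITIVE_TOKENS = {
--     "admin": "admin portal",
--     "claimsxray": "Microsoft debug Relying Party (should never be in production)",
--     "test": "non-production environment registered alongside prod",
--     "dev": "development environment",
--     "stage": "staging environment",
--     "ops]": "operations admin (e.g. [Ops] prefix)",
--     "knox": "Samsung Knox / privileged management",
--     "sso": "SSO admin",
--     "idp": "IdP admin",
--     "vault": "secrets vault",
--     "sap": "SAP",
--     "workday": "Workday HR",
--     "salesforce": "Salesforce",
--     "zscaler": "Zscaler admin",
--     "privileg": "privileged access",
--     "secret": "secrets",
--     "sti(": "Threat Intelligence (named explicitly)",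
-- }
--
--
-- def classify_relying_parties(rps: list[str]) -> dict[str, list[tuple[str, str]]]:
--     """Group RPs by sensitivity tokens. Returns {token_label: [(rp, reason), ...]}."""
--     # pass 1: tag each RP with its first matching label (skip unmatched RPs)
--     tagged = [
--         (rp, lab)
--         for rp in rps
--         if (lab := next((label for tok, label in RP_SENSITIVE_TOKENS.items()
--                          if tok in rp.lower()), None)) is not None
--     ]
--     # pass 2: labels in order of first appearance, then collect each bucket by a scan
--     order = list(dict.fromkeys(lab for _, lab in tagged))
--     return {lab: [p for p in tagged if p[1] == lab] for lab in order}
-- ===== Notes on version B (the rewrite author's own statement) =====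
-- stated objective: alternative
-- what changed: Replaces the interleaved nested loop that mutates dict buckets via setdefault/append with a two-pass pipeline: first tag every RP with its first matching label, then dedup the labels in order of first appearance and build each bucket by filtering the tagged list.
import Mathlib
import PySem

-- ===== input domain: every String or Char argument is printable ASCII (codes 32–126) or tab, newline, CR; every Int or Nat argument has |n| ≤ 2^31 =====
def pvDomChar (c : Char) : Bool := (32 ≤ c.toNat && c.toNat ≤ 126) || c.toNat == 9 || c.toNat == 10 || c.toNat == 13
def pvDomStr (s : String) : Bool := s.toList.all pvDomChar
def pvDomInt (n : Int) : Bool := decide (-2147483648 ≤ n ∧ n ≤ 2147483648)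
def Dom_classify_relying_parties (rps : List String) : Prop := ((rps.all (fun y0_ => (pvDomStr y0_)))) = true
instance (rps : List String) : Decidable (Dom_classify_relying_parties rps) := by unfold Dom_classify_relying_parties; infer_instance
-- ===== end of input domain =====

-- B changes the decomposition (tag, dedup labels, filter per label) instead of A's
-- nested loop mutating dict buckets; same exact result, similar cost.

-- ===== PORT A =====
-- the module-level RP_SENSITIVE_TOKENS dict, as its items() list (insertion order)
def pvTokens : List (String × String) :=
  [("admin", "admin portal"),
   ("claimsxray", "Microsoft debug Relying Party (should never be in production)"),
   ("test", "non-production environment registered alongside prod"),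
   ("dev", "development environment"),
   ("stage", "staging environment"),
   ("ops]", "operations admin (e.g. [Ops] prefix)"),
   ("knox", "Samsung Knox / privileged management"),
   ("sso", "SSO admin"),
   ("idp", "IdP admin"),
   ("vault", "secrets vault"),
   ("sap", "SAP"),
   ("workday", "Workday HR"),
   ("salesforce", "Salesforce"),
   ("zscaler", "Zscaler admin"),
   ("privileg", "privileged access"),
   ("secret", "secrets"),
   ("sti(", "Threat Intelligence (named explicitly)")]

-- inner 'for tok, label in RP_SENSITIVE_TOKENS.items(): … break' loop of A;
-- 'by_token.setdefault(label, []).append((rp, label))' = overwrite label's bucket with bucket ++ [(rp,label)]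
def pvLoopA (rp rpLow : String) (d : PySem.Dict String (List (String × String))) :
    List (String × String) → PySem.Dict String (List (String × String))
  | [] => d
  | (tok, label) :: rest =>
    if PySem.Str.isIn tok rpLow then
      d.insert label ((d.getD label []) ++ [(rp, label)])
    else pvLoopA rp rpLow d rest

def classify_relying_parties (rps : List String) : List (String × List (String × String)) :=
  (rps.foldl (fun d rp => pvLoopA rp (PySem.Str.lower rp) d pvTokens) PySem.Dict.empty).items

-- ===== PORT B =====
-- next((label for tok, label in … if tok in rp.lower()), None)
def pvFirstLabel (rp : String) : Option String :=
  (pvTokens.find? (fun p => PySem.Str.isIn p.1 (PySem.Str.lower rp))).map (·.2)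

def classify_relying_parties_alt (rps : List String) : List (String × List (String × String)) :=
  let tagged := rps.filterMap (fun rp => (pvFirstLabel rp).map (fun lab => (rp, lab)))
  let order := PySem.List.dedup (tagged.map (·.2))
  order.map (fun lab => (lab, tagged.filter (fun p => p.2 == lab)))

-- ===== PRECONDITION & SPEC =====
def Spec_classify_relying_parties (rps : List String) (out : List (String × List (String × String))) : Prop := out = classify_relying_parties_alt rps
instance (rps : List String) (out : List (String × List (String × String))) : Decidable (Spec_classify_relying_parties rps out) := by unfold Spec_classify_relying_parties; infer_instance

-- ===== CLAIM (what is proved, stated in full; the proofs are below) =====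
def Claim_equal_classify_relying_parties : Prop := ∀ (rps : List String), Dom_classify_relying_parties rps → Spec_classify_relying_parties rps (classify_relying_parties rps)

-- ===== LEMMAS AND PROOFS =====

-- A's per-pair dict update, abstracted
def pvStep (d : PySem.Dict String (List (String × String))) (p : String × String) :
    PySem.Dict String (List (String × String)) :=
  d.insert p.2 ((d.getD p.2 []) ++ [p])

lemma pvLoopA_eq (rp rpLow : String) (d : PySem.Dict String (List (String × String)))
    (toks : List (String × String)) :
    pvLoopA rp rpLow d toks =
      match (toks.find? (fun p => PySem.Str.isIn p.1 rpLow)).map (·.2) with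
      | some lab => pvStep d (rp, lab)
      | none => d := by
  induction toks with
  | nil => simp [pvLoopA]
  | cons hd tl ih =>
    obtain ⟨tok, label⟩ := hd
    cases h : PySem.Str.isIn tok rpLow with
    | true =>
      simp only [pvLoopA, h, if_true]
      rw [List.find?_cons_of_pos (by simpa using h)]
      simp only [Option.map_some, pvStep]
    | false =>
      simp only [pvLoopA, h, Bool.false_eq_true, if_false]
      rw [List.find?_cons_of_neg (by simpa using h)]
      exact ih

lemma pvLoopA_first (rp : String) (d : PySem.Dict String (List (String × String))) :
    pvLoopA rp (PySem.Str.lower rp) d pvTokens =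
      match pvFirstLabel rp with
      | some lab => pvStep d (rp, lab)
      | none => d := by
  rw [pvLoopA_eq]; rfl

-- fold over rps = fold of pvStep over the tagged list
lemma pvFold_eq_tagged (rps : List String) (d : PySem.Dict String (List (String × String))) :
    rps.foldl (fun d rp => pvLoopA rp (PySem.Str.lower rp) d pvTokens) d =
      (rps.filterMap (fun rp => (pvFirstLabel rp).map (fun lab => (rp, lab)))).foldl pvStep d := by
  have hfun : (fun (d : PySem.Dict String (List (String × String))) rp =>
        pvLoopA rp (PySem.Str.lower rp) d pvTokens)
      = fun d rp =>
        match pvFirstLabel rp with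
        | some lab => pvStep d (rp, lab)
        | none => d := by
    funext d rp; exact pvLoopA_first rp d
  rw [hfun]
  induction rps generalizing d with
  | nil => rfl
  | cons rp rest ih =>
    cases h : pvFirstLabel rp with
    | none => simp only [List.foldl_cons, List.filterMap_cons, h, Option.map_none]; exact ih d
    | some lab => simp only [List.foldl_cons, List.filterMap_cons, h, Option.map_some]; exact ih _

lemma pvDedup_append (xs : List String) (x : String) :
    PySem.List.dedup (xs ++ [x]) =
      if x ∈ xs then PySem.List.dedup xs else PySem.List.dedup xs ++ [x] := by
  rw [PySem.List.dedup_eq_ofList, PySem.List.dedup_eq_ofList,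
    PySem.Set.ofList_eq_foldl, PySem.Set.ofList_eq_foldl, List.foldl_append, List.foldl_cons,
    List.foldl_nil]
  rw [show List.foldl PySem.Set.add [] xs = PySem.Set.ofList xs from
    (PySem.Set.ofList_eq_foldl xs).symm]
  unfold PySem.Set.add
  by_cases hx : x ∈ xs
  · rw [if_pos ((PySem.Set.contains_iff _ _).mpr ((PySem.Set.mem_ofList xs x).mpr hx)), if_pos hx]
  · rw [if_neg (by
      intro hc
      exact hx ((PySem.Set.mem_ofList xs x).mp ((PySem.Set.contains_iff _ _).mp hc))),
      if_neg hx]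

-- grouping lemma: the setdefault/append fold's items are exactly B's dedup+filter table
lemma pvGroup_items (pairs : List (String × String)) :
    (pairs.foldl pvStep PySem.Dict.empty).items =
      (PySem.List.dedup (pairs.map (·.2))).map
        (fun lab => (lab, pairs.filter (fun p => p.2 == lab))) := by
  induction pairs using List.reverseRecOn with
  | nil => simp [PySem.Dict.empty, PySem.List.dedup]
  | append_singleton pairs p ih =>
    rw [List.foldl_append, List.foldl_cons, List.foldl_nil]
    have hkeys : (pairs.foldl pvStep PySem.Dict.empty).keys
        = PySem.List.dedup (pairs.map (·.2)) := by
      simp only [PySem.Dict.keys, ih, List.map_map]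
      rw [show ((fun (x : String × List (String × String)) => x.1) ∘
          fun lab => (lab, List.filter (fun p => p.2 == lab) pairs)) = id from rfl, List.map_id]
    have hnodup : (pairs.foldl pvStep PySem.Dict.empty).keys.Nodup := by
      rw [hkeys]; exact PySem.List.nodup_dedup _
    rw [List.map_append]
    simp only [List.map_cons, List.map_nil]
    rw [pvDedup_append]
    by_cases hmem : p.2 ∈ pairs.map (·.2)
    · -- p's label already has a bucket: insert overwrites in place
      have hmemd : p.2 ∈ PySem.List.dedup (pairs.map (·.2)) :=
        (PySem.List.mem_dedup _ _).mpr hmem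
      have hcont : (pairs.foldl pvStep PySem.Dict.empty).contains p.2 = true := by
        rw [PySem.Dict.contains_iff_mem_keys, hkeys]; exact hmemd
      have hget : (pairs.foldl pvStep PySem.Dict.empty).get? p.2
          = some (pairs.filter (fun q => q.2 == p.2)) := by
        apply PySem.Dict.get?_of_mem_items _ _ hnodup
        rw [ih]
        exact List.mem_map_of_mem hmemd
      rw [if_pos hmem,
        show pvStep (List.foldl pvStep PySem.Dict.empty pairs) p
          = (List.foldl pvStep PySem.Dict.empty pairs).insert p.2
              ((List.foldl pvStep PySem.Dict.empty pairs).getD p.2 [] ++ [p]) from rfl]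
      rw [PySem.Dict.items_insert_of_contains _ _ hcont,
        PySem.Dict.getD_of_get?_eq_some _ _ hget, ih, List.map_map]
      apply List.map_congr_left
      intro lab _
      by_cases hlab : lab = p.2
      · subst hlab
        simp [List.filter_append]
      · simp only [Function.comp_apply]
        rw [if_neg (by simpa using hlab)]
        have hfilter : List.filter (fun q => q.2 == lab) [p] = [] := by
          simp [Ne.symm hlab]
        simp [List.filter_append, hfilter]
    · -- fresh label: the bucket [(rp, lab)] is appended at the end
      have hcont : (pairs.foldl pvStep PySem.Dict.empty).contains p.2 = false := by
        rw [Bool.eq_false_iff]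
        intro hc
        exact hmem ((PySem.List.mem_dedup _ _).mp (by
          rw [← hkeys]; exact (PySem.Dict.contains_iff_mem_keys _ _).mp hc))
      rw [if_neg hmem,
        show pvStep (List.foldl pvStep PySem.Dict.empty pairs) p
          = (List.foldl pvStep PySem.Dict.empty pairs).insert p.2
              ((List.foldl pvStep PySem.Dict.empty pairs).getD p.2 [] ++ [p]) from rfl]
      rw [PySem.Dict.items_insert_of_not_contains _ _ hcont,
        PySem.Dict.getD_of_not_contains _ _ hcont, ih, List.map_append]
      congr 1
      · apply List.map_congr_left
        intro lab hlab
        have hne : lab ≠ p.2 := by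
          intro h; exact hmem (h ▸ (PySem.List.mem_dedup _ _).mp hlab)
        have hfilter : List.filter (fun q => q.2 == lab) [p] = [] := by
          simp [Ne.symm hne]
        simp [List.filter_append, hfilter]
      · have hnil : List.filter (fun q => q.2 == p.2) pairs = [] := by
          rw [List.filter_eq_nil_iff]
          intro q hq h
          exact hmem (by
            have : q.2 = p.2 := by simpa using h
            exact this ▸ List.mem_map_of_mem hq)
        simp [List.filter_append, hnil]

-- ===== VERDICT (by name: the statement is the Claim_ definition above) =====
theorem classify_relying_parties_spec : Claim_equal_classify_relying_parties := by
  intro rps _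
  unfold Spec_classify_relying_parties classify_relying_parties classify_relying_parties_alt
  rw [pvFold_eq_tagged, pvGroup_items]
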